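-- pv_equiv track=rewrite | github.com/aviswerdlow/k4 | experiments/pipeline_v4/scripts/v4.1/pareto_anchor_placement.py | find_valid_positions
-- ===== SOURCE A (Python) =====
-- from typing import List, Dict, Tuple, Optional
--
-- def find_valid_positions(text: str, anchor_length: int,
--                         existing_positions: List[Tuple[int, int]]) -> List[int]:
--     """
--     Find valid positions for anchor placement.
--
--     Args:
--         text: Head text
--         anchor_length: Length of anchor to place
--         existing_positions: Already placed anchors (start, end)
--
--     Returns:
--         List of valid starting positions
--     """
--     valid = []
--     text_len = len(text)
--
--     for pos in range(text_len - anchor_length + 1):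
--         # Check position is valid
--         end_pos = pos + anchor_length
--
--         # Don't go past text boundary
--         if end_pos > text_len:
--             continue
--
--         # Check no overlap with existing anchors
--         overlaps = False
--         for existing_start, existing_end in existing_positions:
--             # Check for overlap or too close (min spacing = 2)
--             if not (end_pos + 2 <= existing_start or pos >= existing_end + 2):
--                 overlaps = True
--                 break
--
--         if not overlaps:
--             valid.append(pos)
--
--     return valid
-- ===== SOURCE B (Python) =====
-- def find_valid_positions(text, anchor_length, existing_positions):
--     n = len(text) - anchor_length + 1
--     if n <= 0:
--         return []
--     # difference map of forbidden-interval boundaries, one sweep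
--     deltas = {}
--     for s, e in existing_positions:
--         lo = s - anchor_length - 1
--         if lo < 0:
--             lo = 0
--         hi = e + 1
--         if hi > n - 1:
--             hi = n - 1
--         if lo <= hi:
--             deltas[lo] = deltas.get(lo, 0) + 1
--             deltas[hi + 1] = deltas.get(hi + 1, 0) - 1
--     valid = []
--     running = 0
--     for pos in range(n):
--         running += deltas.get(pos, 0)
--         if running == 0:
--             valid.append(pos)
--     return valid
-- ===== Notes on version B (the rewrite author's own statement) =====
-- stated objective: faster
-- what changed: Replaces A's per-candidate inner scan over all existing anchors by a difference map of forbidden-interval boundaries built once, followed by a single running-sum sweep over the positions.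
import Mathlib
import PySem

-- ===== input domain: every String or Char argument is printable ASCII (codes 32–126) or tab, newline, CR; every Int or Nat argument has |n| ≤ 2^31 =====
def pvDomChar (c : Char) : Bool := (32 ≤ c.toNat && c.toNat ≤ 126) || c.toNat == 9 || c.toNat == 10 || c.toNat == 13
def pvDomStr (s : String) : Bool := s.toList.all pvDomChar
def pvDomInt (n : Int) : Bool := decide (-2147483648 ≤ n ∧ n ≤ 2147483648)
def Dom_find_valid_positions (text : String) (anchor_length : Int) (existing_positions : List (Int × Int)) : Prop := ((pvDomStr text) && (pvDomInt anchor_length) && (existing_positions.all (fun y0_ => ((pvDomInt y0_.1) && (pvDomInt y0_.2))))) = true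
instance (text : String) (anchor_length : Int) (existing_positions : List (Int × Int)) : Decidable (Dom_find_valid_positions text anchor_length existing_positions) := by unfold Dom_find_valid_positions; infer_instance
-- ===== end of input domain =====

-- B replaces A's per-position inner scan over the anchors (O(n*m)) by a difference map of
-- forbidden-interval boundaries and a single running-sum sweep (O(n+m)).

-- ===== PORT A =====
-- A's inner 'for existing_start, existing_end: … break' loop
def pvCheckOverlaps (pos end_pos : Int) : List (Int × Int) → Bool
  | [] => false
  | (es, ee) :: rest =>
      if !(decide (end_pos + 2 ≤ es) || decide (pos ≥ ee + 2)) then true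
      else pvCheckOverlaps pos end_pos rest

def find_valid_positions (text : String) (anchor_length : Int) (existing_positions : List (Int × Int)) : List Int :=
  let text_len : Int := PySem.Str.len text
  (PySem.List.pyRange 0 (text_len - anchor_length + 1) 1).foldl (fun valid pos =>
    let end_pos := pos + anchor_length
    if end_pos > text_len then valid
    else if pvCheckOverlaps pos end_pos existing_positions then valid
    else valid ++ [pos]) []

-- ===== PORT B =====
-- B's 'for s, e in existing_positions: …' loop building the difference map
def pvBuildDeltas (anchor_length n : Int) (d : PySem.Dict Int Int) : List (Int × Int) → PySem.Dict Int Int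
  | [] => d
  | p :: rest =>
      let lo0 := p.1 - anchor_length - 1
      let lo := if lo0 < 0 then 0 else lo0
      let hi0 := p.2 + 1
      let hi := if hi0 > n - 1 then n - 1 else hi0
      pvBuildDeltas anchor_length n
        (if lo ≤ hi then (d.modify lo 0 (· + 1)).modify (hi + 1) 0 (· - 1) else d) rest

def find_valid_positions_alt (text : String) (anchor_length : Int) (existing_positions : List (Int × Int)) : List Int :=
  let n : Int := PySem.Str.len text - anchor_length + 1
  if n ≤ 0 then []
  else
    let deltas := pvBuildDeltas anchor_length n PySem.Dict.empty existing_positions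
    ((PySem.List.pyRange 0 n 1).foldl (fun st pos =>
        let running := st.1 + deltas.getD pos 0
        (running, if running == 0 then st.2 ++ [pos] else st.2))
      ((0 : Int), ([] : List Int))).2

-- ===== PRECONDITION & SPEC =====
def Spec_find_valid_positions (text : String) (anchor_length : Int) (existing_positions : List (Int × Int)) (out : List Int) : Prop := out = find_valid_positions_alt text anchor_length existing_positions
instance (text : String) (anchor_length : Int) (existing_positions : List (Int × Int)) (out : List Int) : Decidable (Spec_find_valid_positions text anchor_length existing_positions out) := by unfold Spec_find_valid_positions; infer_instance

-- ===== CLAIM (what is proved, stated in full; the proofs are below) =====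
def Claim_equal_find_valid_positions : Prop := ∀ (text : String) (anchor_length : Int) (existing_positions : List (Int × Int)), Dom_find_valid_positions text anchor_length existing_positions → Spec_find_valid_positions text anchor_length existing_positions (find_valid_positions text anchor_length existing_positions)

-- ===== LEMMAS AND PROOFS =====

-- number of intervals whose (clamped) forbidden range covers pos
def pvCnt (L n : Int) (ex : List (Int × Int)) (pos : Int) : Int :=
  ((ex.filter (fun p =>
      decide (max 0 (p.1 - L - 1) ≤ pos ∧ pos ≤ min (n - 1) (p.2 + 1)))).length : Int)

lemma pvCnt_nil (L n pos : Int) : pvCnt L n [] pos = 0 := rfl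

lemma pvCnt_cons (L n : Int) (p : Int × Int) (ex : List (Int × Int)) (pos : Int) :
    pvCnt L n (p :: ex) pos =
      (if max 0 (p.1 - L - 1) ≤ pos ∧ pos ≤ min (n - 1) (p.2 + 1) then 1 else 0)
        + pvCnt L n ex pos := by
  cases hd : decide (max 0 (p.1 - L - 1) ≤ pos ∧ pos ≤ min (n - 1) (p.2 + 1)) with
  | true =>
      simp only [pvCnt, List.filter_cons, hd, if_pos (of_decide_eq_true hd)]
      rw [if_pos trivial, List.length_cons]
      push_cast; ring
  | false =>
      simp only [pvCnt, List.filter_cons, hd, if_neg (of_decide_eq_false hd)]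
      simp

lemma pvCnt_neg_one (L n : Int) (ex : List (Int × Int)) : pvCnt L n ex (-1) = 0 := by
  induction ex with
  | nil => rfl
  | cons p rest ih =>
      rw [pvCnt_cons, ih, if_neg (by omega)]
      ring

lemma deltas_getD (L n : Int) (ex : List (Int × Int)) :
    ∀ (d : PySem.Dict Int Int) (pos : Int), 0 ≤ pos → pos ≤ n - 1 →
      (pvBuildDeltas L n d ex).getD pos 0
        = d.getD pos 0 + (pvCnt L n ex pos - pvCnt L n ex (pos - 1)) := by
  induction ex with
  | nil => intro d pos h1 h2; simp [pvBuildDeltas, pvCnt_nil]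
  | cons p rest ih =>
      intro d pos h1 h2
      simp only [pvBuildDeltas]
      rw [ih _ pos h1 h2, pvCnt_cons, pvCnt_cons]
      by_cases hle : (if p.1 - L - 1 < 0 then 0 else p.1 - L - 1) ≤
          (if p.2 + 1 > n - 1 then n - 1 else p.2 + 1)
      · rw [if_pos hle]
        simp only [PySem.Dict.getD_modify]
        split_ifs <;> (try subst_vars) <;> omega
      · rw [if_neg hle]
        split_ifs <;> omega

lemma pvCnt_eq_zero_iff (L n : Int) (ex : List (Int × Int)) (pos : Int) :
    pvCnt L n ex pos = 0 ↔
      ∀ p ∈ ex, ¬(max 0 (p.1 - L - 1) ≤ pos ∧ pos ≤ min (n - 1) (p.2 + 1)) := by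
  simp [pvCnt, List.filter_eq_nil_iff]

lemma checkOverlaps_eq_any (pos e : Int) (ex : List (Int × Int)) :
    pvCheckOverlaps pos e ex
      = ex.any (fun p => !(decide (e + 2 ≤ p.1) || decide (pos ≥ p.2 + 2))) := by
  induction ex with
  | nil => rfl
  | cons p rest ih =>
      obtain ⟨es, ee⟩ := p
      simp only [pvCheckOverlaps, List.any_cons]
      split_ifs with h
      · simp [h]
      · simp only [Bool.not_eq_true] at h; simp [h, ih]

lemma scan_inv (L n : Int) (ex : List (Int × Int)) :
    ∀ (k : Nat) (a : Int) (acc : List Int), 0 ≤ a → (n - a).toNat = k →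
      ((PySem.List.pyRange a n 1).foldl (fun st pos =>
          let running := st.1 + (pvBuildDeltas L n PySem.Dict.empty ex).getD pos 0
          (running, if running == 0 then st.2 ++ [pos] else st.2))
        (pvCnt L n ex (a - 1), acc)).2
      = acc ++ (PySem.List.pyRange a n 1).filter (fun pos => pvCnt L n ex pos == 0) := by
  intro k
  induction k with
  | zero =>
      intro a acc ha hk
      rw [PySem.List.pyRange_one_eq_nil (by omega)]
      simp
  | succ m ih =>
      intro a acc ha hk
      have hlt : a < n := by omega
      have hd0 : (PySem.Dict.empty : PySem.Dict Int Int).getD a 0 = 0 := rfl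
      have hg := deltas_getD L n ex PySem.Dict.empty a ha (by omega)
      rw [hd0] at hg
      have harith : pvCnt L n ex (a - 1) + (pvBuildDeltas L n PySem.Dict.empty ex).getD a 0
          = pvCnt L n ex a := by rw [hg]; ring
      have step_eq : (let running := (pvCnt L n ex (a - 1), acc).1
              + (pvBuildDeltas L n PySem.Dict.empty ex).getD a 0
            ((running, if running == 0 then (pvCnt L n ex (a - 1), acc).2 ++ [a]
              else (pvCnt L n ex (a - 1), acc).2) : Int × List Int))
          = (pvCnt L n ex a, if pvCnt L n ex a == 0 then acc ++ [a] else acc) := by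
        show (pvCnt L n ex (a - 1) + (pvBuildDeltas L n PySem.Dict.empty ex).getD a 0,
            if pvCnt L n ex (a - 1) + (pvBuildDeltas L n PySem.Dict.empty ex).getD a 0 == 0
            then acc ++ [a] else acc) = _
        rw [harith]
      have ih' := ih (a + 1) (if pvCnt L n ex a == 0 then acc ++ [a] else acc)
        (by omega) (by omega)
      rw [show a + 1 - 1 = a from by ring] at ih'
      rw [PySem.List.pyRange_one_cons hlt, List.foldl_cons, step_eq, ih', List.filter_cons]
      by_cases h0 : pvCnt L n ex a == 0 <;> simp [h0]

theorem main_eq (text : String) (L : Int) (ex : List (Int × Int)) :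
    find_valid_positions text L ex = find_valid_positions_alt text L ex := by
  have htl0 : (0:Int) ≤ PySem.Str.len text := by
    rw [PySem.Str.len_eq]; positivity
  simp only [find_valid_positions, find_valid_positions_alt]
  set n := PySem.Str.len text - L + 1 with hn
  by_cases hn0 : n ≤ 0
  · rw [if_pos hn0, PySem.List.pyRange_one_eq_nil (by omega)]
    simp
  · rw [if_neg hn0]
    have hA : (PySem.List.pyRange 0 n 1).foldl (fun valid pos =>
        if pos + L > PySem.Str.len text then valid
        else if pvCheckOverlaps pos (pos + L) ex then valid
        else valid ++ [pos]) []
        = (PySem.List.pyRange 0 n 1).foldl (fun valid pos =>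
            if (!pvCheckOverlaps pos (pos + L) ex) = true then valid ++ [pos] else valid) [] := by
      apply PySem.List.foldl_congr_mem
      intro acc pos hpos
      rw [PySem.List.mem_pyRange_one] at hpos
      rw [if_neg (by omega)]
      cases hc : pvCheckOverlaps pos (pos + L) ex <;> simp_all
    rw [hA, PySem.List.foldl_append_if_eq_filter]
    have hB := scan_inv L n ex (n - 0).toNat 0 [] le_rfl rfl
    rw [show (0:Int) - 1 = -1 from by ring, pvCnt_neg_one] at hB
    rw [hB]
    simp only [List.nil_append]
    apply List.filter_congr
    intro pos hpos
    rw [PySem.List.mem_pyRange_one] at hpos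
    rw [checkOverlaps_eq_any, Bool.eq_iff_iff]
    simp only [Bool.not_eq_true', List.any_eq_false, Bool.not_eq_false, Bool.or_eq_true,
      decide_eq_true_eq, beq_iff_eq, pvCnt_eq_zero_iff]
    constructor <;> intro h q hq <;> specialize h q hq <;> omega

-- ===== VERDICT (by name: the statement is the Claim_ definition above) =====
theorem find_valid_positions_spec : Claim_equal_find_valid_positions := by
  intro text L ex _
  exact main_eq text L ex
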